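-- pv_equiv track=rewrite | github.com/withNoclout/LeetCode-Med | quiz_partition.py | partitionArray
-- ===== SOURCE A (Python) =====
-- def partitionArray(nums, k):
--     nums.sort()
--     count = 1
--     start = nums[0]
--
--     for x in nums:
--         if x - start > k:
--             count += 1
--             start = x
--
--     return count
-- ===== SOURCE B (Python) =====
-- def partitionArray(nums, k):
--     # Sort in place (same observable mutation as the original), then jump
--     # group-to-group with a lo-bounded binary search instead of scanning
--     # every element.
--     nums.sort()
--     n = len(nums)
--     count = 1
--     start = nums[0]
--     i = 0
--     while True:
--         # first index j in [i, n) with nums[j] > start + k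
--         lo, hi = i, n
--         while lo < hi:
--             mid = (lo + hi) // 2
--             if nums[mid] <= start + k:
--                 lo = mid + 1
--             else:
--                 hi = mid
--         if lo == n:
--             return count
--         count += 1
--         start = nums[lo]
--         i = lo + 1
-- ===== Notes on version B (the rewrite author's own statement) =====
-- stated objective: alternative
-- what changed: A's linear greedy scan over the sorted array is replaced by a loop that jumps from group start to group start with a hand-written lo-bounded binary search (bisect_right), so after the sort only group boundaries are binary-searched instead of every element being compared.
import Mathlib
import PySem

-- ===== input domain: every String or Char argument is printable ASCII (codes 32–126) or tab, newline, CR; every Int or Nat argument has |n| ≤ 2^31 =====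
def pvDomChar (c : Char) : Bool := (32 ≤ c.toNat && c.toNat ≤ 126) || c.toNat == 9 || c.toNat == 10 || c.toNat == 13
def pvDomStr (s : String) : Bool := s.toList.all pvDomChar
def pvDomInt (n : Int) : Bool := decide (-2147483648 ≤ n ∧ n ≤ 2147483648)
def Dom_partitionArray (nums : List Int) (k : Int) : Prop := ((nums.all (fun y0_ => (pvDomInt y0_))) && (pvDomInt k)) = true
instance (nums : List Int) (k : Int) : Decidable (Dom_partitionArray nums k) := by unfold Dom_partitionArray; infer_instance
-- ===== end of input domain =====

-- B replaces A's linear greedy scan by binary-search jumps from group start to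
-- group start over the sorted data (same in-place sort mutation as A; the
-- equivalence proved here is about the return value).

-- ===== PORT A =====
def partitionArray (nums : List Int) (k : Int) : Int :=
  let s := PySem.List.sorted nums id
  match s with
  | [] => 0  -- nums[0] raises IndexError here; excluded by Pre_
  | h :: _ =>
    (s.foldl (fun (st : Int × Int) x => if x - st.2 > k then (st.1 + 1, x) else st) (1, h)).1

-- ===== PORT B =====
-- hand-written lo-bounded bisect_right from Source B (exact: Python's // on the
-- nonnegative ints lo, hi is Nat division); fuel = hi - lo is a pure
-- totality device and is always sufficient
def pvBisectF (a : List Int) (x : Int) : Nat → Nat → Nat → Nat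
  | 0, lo, _ => lo
  | fuel + 1, lo, hi =>
    if lo < hi then
      let mid := (lo + hi) / 2
      if a.getD mid 0 ≤ x then pvBisectF a x fuel (mid + 1) hi else pvBisectF a x fuel lo mid
    else lo

def pvBisect (a : List Int) (x : Int) (lo hi : Nat) : Nat :=
  pvBisectF a x (hi - lo) lo hi

-- the group-jumping while-loop of Source B; fuel is again only a totality device
def pvJumpF (s : List Int) (k : Int) : Nat → Int → Int → Nat → Int
  | 0, count, _, _ => count
  | fuel + 1, count, start, i =>
    let lo := pvBisect s (start + k) i s.length
    if lo < s.length then pvJumpF s k fuel (count + 1) (s.getD lo 0) (lo + 1) else count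

def partitionArray_alt (nums : List Int) (k : Int) : Int :=
  let s := PySem.List.sorted nums id
  match s with
  | [] => 0  -- nums[0] raises IndexError here; excluded by Pre_
  | h :: _ => pvJumpF s k (s.length + 1) 1 h 0

-- ===== PRECONDITION & SPEC =====
-- Pre_ excludes only the empty list, on which both A and B raise IndexError at nums[0].
def Pre_partitionArray (nums : List Int) (k : Int) : Prop := nums ≠ []
instance (nums : List Int) (k : Int) : Decidable (Pre_partitionArray nums k) := by
  unfold Pre_partitionArray; infer_instance

def pvWitness_partitionArray : List Int × Int := ([2, 9, 4, 1], 3)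

def Spec_partitionArray (nums : List Int) (k : Int) (out : Int) : Prop := out = partitionArray_alt nums k
instance (nums : List Int) (k : Int) (out : Int) : Decidable (Spec_partitionArray nums k out) := by
  unfold Spec_partitionArray; infer_instance

-- ===== CLAIM (what is proved, stated in full; the proofs are below) =====
def Claim_equal_partitionArray : Prop := ∀ (nums : List Int) (k : Int), Dom_partitionArray nums k → Pre_partitionArray nums k → Spec_partitionArray nums k (partitionArray nums k)

-- ===== LEMMAS AND PROOFS =====

theorem pvBisectF_ge (a : List Int) (x : Int) :
    ∀ (fuel lo hi : Nat), lo ≤ pvBisectF a x fuel lo hi := by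
  intro fuel
  induction fuel with
  | zero => intro lo hi; exact le_rfl
  | succ n ih =>
    intro lo hi
    rw [pvBisectF]
    by_cases h1 : lo < hi
    · rw [if_pos h1]
      dsimp only
      by_cases h2 : a.getD ((lo + hi) / 2) 0 ≤ x
      · rw [if_pos h2]
        have := ih ((lo + hi) / 2 + 1) hi
        omega
      · rw [if_neg h2]
        exact ih lo ((lo + hi) / 2)
    · rw [if_neg h1]

theorem pv_getD_mono (a : List Int) (hs : List.Pairwise (· ≤ ·) a) (i j : Nat)
    (hij : i ≤ j) (hj : j < a.length) : a.getD i 0 ≤ a.getD j 0 := by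
  rcases Nat.eq_or_lt_of_le hij with rfl | hlt
  · exact le_rfl
  · have h := List.pairwise_iff_getElem.mp hs i j (by omega) hj hlt
    rw [List.getD_eq_getElem a 0 (by omega), List.getD_eq_getElem a 0 hj]
    exact h

theorem pvBisectF_spec (a : List Int) (x : Int) (hs : List.Pairwise (· ≤ ·) a) :
    ∀ (fuel lo hi : Nat), hi - lo ≤ fuel → lo ≤ hi → hi ≤ a.length →
      pvBisectF a x fuel lo hi ≤ hi ∧
      (∀ j, lo ≤ j → j < pvBisectF a x fuel lo hi → a.getD j 0 ≤ x) ∧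
      (∀ j, pvBisectF a x fuel lo hi ≤ j → j < hi → x < a.getD j 0) := by
  intro fuel
  induction fuel with
  | zero =>
    intro lo hi h _ _
    rw [pvBisectF]
    exact ⟨by omega, fun j h1 h2 => by omega, fun j h1 h2 => by omega⟩
  | succ n ih =>
    intro lo hi h hlh hha
    rw [pvBisectF]
    by_cases h1 : lo < hi
    · rw [if_pos h1]
      dsimp only
      have hmid1 : lo ≤ (lo + hi) / 2 := by omega
      have hmid2 : (lo + hi) / 2 < hi := by omega
      by_cases h2 : a.getD ((lo + hi) / 2) 0 ≤ x
      · rw [if_pos h2]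
        obtain ⟨hb, hlow, hhigh⟩ := ih ((lo + hi) / 2 + 1) hi (by omega) (by omega) hha
        refine ⟨hb, fun j hj1 hj2 => ?_, hhigh⟩
        by_cases hj3 : j ≤ (lo + hi) / 2
        · exact le_trans (pv_getD_mono a hs j _ hj3 (by omega)) h2
        · exact hlow j (by omega) hj2
      · rw [if_neg h2]
        obtain ⟨hb, hlow, hhigh⟩ := ih lo ((lo + hi) / 2) (by omega) (by omega) (by omega)
        refine ⟨by omega, hlow, fun j hj1 hj2 => ?_⟩
        by_cases hj3 : (lo + hi) / 2 ≤ j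
        · exact lt_of_lt_of_le (lt_of_not_ge h2)
            (pv_getD_mono a hs ((lo + hi) / 2) j hj3 (by omega))
        · exact hhigh j hj1 (by omega)
    · rw [if_neg h1]
      exact ⟨by omega, fun j hj1 hj2 => by omega, fun j hj1 hj2 => by omega⟩

theorem pvBisect_ge (a : List Int) (x : Int) (lo hi : Nat) : lo ≤ pvBisect a x lo hi :=
  pvBisectF_ge a x (hi - lo) lo hi

theorem pvBisect_spec (a : List Int) (x : Int) (hs : List.Pairwise (· ≤ ·) a)
    (lo hi : Nat) (hlh : lo ≤ hi) (hha : hi ≤ a.length) :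
    pvBisect a x lo hi ≤ hi ∧
    (∀ j, lo ≤ j → j < pvBisect a x lo hi → a.getD j 0 ≤ x) ∧
    (∀ j, pvBisect a x lo hi ≤ j → j < hi → x < a.getD j 0) :=
  pvBisectF_spec a x hs (hi - lo) lo hi le_rfl hlh hha

theorem pv_foldl_const (k c start : Int) (l : List Int)
    (h : ∀ x ∈ l, ¬ x - start > k) :
    l.foldl (fun (st : Int × Int) x => if x - st.2 > k then (st.1 + 1, x) else st) (c, start)
      = (c, start) := by
  induction l with
  | nil => rfl
  | cons y ys ih =>
    rw [List.foldl_cons]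
    have hy : ¬ y - start > k := h y (by simp)
    rw [if_neg hy]
    exact ih (fun x hx => h x (by simp [hx]))

theorem pvJumpF_eq_foldl (s : List Int) (k : Int) (hs : List.Pairwise (· ≤ ·) s) :
    ∀ (fuel i : Nat) (c start : Int), s.length - i < fuel →
      pvJumpF s k fuel c start i =
        ((s.drop i).foldl
          (fun (st : Int × Int) x => if x - st.2 > k then (st.1 + 1, x) else st) (c, start)).1 := by
  intro fuel
  induction fuel with
  | zero => intro i c start h; omega
  | succ n ih =>
    intro i c start h
    rw [pvJumpF]
    by_cases hi : s.length ≤ i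
    · have hbi : pvBisect s (start + k) i s.length = i := by
        rw [pvBisect, Nat.sub_eq_zero_of_le hi, pvBisectF]
      rw [List.drop_eq_nil_of_le hi]
      simp only [hbi]
      rw [if_neg (by omega)]
      rfl
    · rw [Nat.not_le] at hi
      set r := pvBisect s (start + k) i s.length with hr
      obtain ⟨hb, hlow, hhigh⟩ := pvBisect_spec s (start + k) hs i s.length (by omega) le_rfl
      have hri : i ≤ r := pvBisect_ge s (start + k) i s.length
      -- split the dropped suffix at r
      have hsplit : s.drop i = (s.drop i).take (r - i) ++ s.drop r := by
        have : s.drop r = (s.drop i).drop (r - i) := by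
          rw [List.drop_drop]; congr 1; omega
        rw [this, List.take_append_drop]
      have hsmall : ∀ x ∈ (s.drop i).take (r - i), ¬ x - start > k := by
        intro x hx
        obtain ⟨j, hj, hxj⟩ := List.getElem_of_mem hx
        have hjlen : j < r - i := by
          have := hj
          simp [List.length_take, List.length_drop] at this
          omega
        have hjr : i + j < r := by omega
        have hjs : i + j < s.length := by omega
        have hxval : x = s.getD (i + j) 0 := by
          rw [List.getD_eq_getElem s 0 hjs, ← hxj]
          rw [List.getElem_take, List.getElem_drop]
        have := hlow (i + j) (by omega) hjr
        omega
      rw [hsplit, List.foldl_append, pv_foldl_const k c start _ hsmall]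
      by_cases hrl : r < s.length
      · rw [if_pos hrl]
        have hgt : s.getD r 0 - start > k := by
          have := hhigh r le_rfl hrl
          omega
        rw [List.drop_eq_getElem_cons hrl, List.foldl_cons]
        rw [if_pos (by rw [← List.getD_eq_getElem s 0 hrl]; exact hgt)]
        rw [← List.getD_eq_getElem s 0 hrl]
        exact ih (r + 1) (c + 1) (s.getD r 0) (by omega)
      · rw [if_neg hrl]
        have : r = s.length := by omega
        rw [this, List.drop_length, List.foldl_nil]

-- ===== VERDICT (by name: the statement is the Claim_ definition above) =====
theorem partitionArray_spec : Claim_equal_partitionArray := by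
  intro nums k _ hpre
  unfold Spec_partitionArray partitionArray partitionArray_alt
  have hlen : (PySem.List.sorted nums id).length = nums.length :=
    PySem.List.length_sorted nums id false
  have hs : List.Pairwise (· ≤ ·) (PySem.List.sorted nums id) :=
    PySem.List.sorted_pairwise nums id
  cases hcase : PySem.List.sorted nums id with
  | nil =>
    exfalso
    apply hpre
    have : nums.length = 0 := by rw [← hlen, hcase]; rfl
    exact List.eq_nil_of_length_eq_zero this
  | cons h t =>
    rw [hcase] at hs
    have := pvJumpF_eq_foldl (h :: t) k hs ((h :: t).length + 1) 0 1 h (by omega)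
    rw [List.drop_zero] at this
    exact this.symm
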